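-- pv_equiv track=rewrite | github.com/gayoungpark/aoc2019 | 24.py | part1
-- ===== SOURCE A (Python) =====
-- def get_neighbors(m, x, y):
--     possibilities = [
--         (x + 1, y),
--         (x - 1, y),
--         (x, y + 1),
--         (x, y - 1),
--     ]
--     neighbors = []
--     for nx, ny in possibilities:
--         if 0 <= nx < len(m[0]) and 0 <= ny < len(m):
--             neighbors.append((nx, ny))
--     return neighbors
--
-- def get_new_bug_state(m, neighbors):
--     count = 0
--     for nx, ny in neighbors:
--         if m[ny][nx] == '#':
--             count += 1
--     return '#' if count == 1 else '.'
--
-- def get_new_empty_state(m, neighbors):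
--     count = 0
--     for nx, ny in neighbors:
--         if m[ny][nx] == '#':
--             count += 1
--     return '#' if count in [1, 2] else '.'
--
-- def calc_score(m):
--     points = 0
--     for y in range(len(m)):
--         for x in range(len(m[0])):
--             multiple = len(m)
--             power = y * multiple + x
--             if m[y][x] == '#':
--                 points += 2 ** power
--     return points
--
-- def get_new_map(m):
--     new_map = []
--     for y in range(len(m)):
--         new_row = ''
--         for x in range(len(m[0])):
--             tile = m[y][x]
--             if tile == '#':
--                 new_row += get_new_bug_state(m, get_neighbors(m, x, y))
--             elif tile == '.':
--                 new_row += get_new_empty_state(m, get_neighbors(m, x, y))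
--             else:
--                 raise Exception(f'Map has unknown tile type -- tile: {tile}, x: {x}, y: {y}')
--         new_map.append(new_row)
--     return new_map
--
-- def part1(m):
--     scores = set()
--
--     while True:
--         new_map = get_new_map(m)
--         score = calc_score(new_map)
--         if score in scores:
--             return score
--         else:
--             scores.add(score)
--         m = new_map
--     return -1
-- ===== SOURCE B (Python) =====
-- def part1(m):
--     h = len(m)
--     w = len(m[0]) if m else 0
--     full = (1 << w) - 1
--
--     rows = []
--     for y, line in enumerate(m):
--         r = 0
--         for x in range(w):
--             tile = line[x]
--             if tile == '#':
--                 r |= 1 << x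
--             elif tile != '.':
--                 raise Exception(f'Map has unknown tile type -- tile: {tile}, x: {x}, y: {y}')
--         rows.append(r)
--
--     def step(rows):
--         # whole-row bit-parallel update: for each row, count neighbour bugs with
--         # full-adder logic over the four shifted masks (left, right, above, below)
--         above = [0] + rows[:-1]
--         below = rows[1:] + [0]
--         out = []
--         for r, c, d in zip(rows, above, below):
--             a = (r << 1) & full
--             b = r >> 1
--             par = a ^ b ^ c ^ d
--             e1 = par & (full ^ (a & b)) & (full ^ (c & d))                    # exactly one
--             e2 = (full ^ par) & (a | b | c | d) & (full ^ (a & b & c & d))    # exactly two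
--             out.append((r & e1) | ((full ^ r) & (e1 | e2)))
--         return out
--
--     def score(rows):
--         # Horner form of sum(rows[y] << (y * h))
--         s = 0
--         for r in reversed(rows):
--             s = (s << h) + r
--         return s
--
--     seen = set()
--     while True:
--         rows = step(rows)
--         s = score(rows)
--         if s in seen:
--             return s
--         seen.add(s)
-- ===== Notes on version B (the rewrite author's own statement) =====
-- stated objective: alternative
-- what changed: B drops A's per-cell neighbour enumeration and string-grid rebuilding: it stores each row as a bitmask and advances a whole row at once with bit-parallel full-adder logic (exactly-1/exactly-2 neighbour masks from shifts, XOR/AND/OR), and computes the score as a closed-form shift-and-add of the row masks instead of a per-cell power loop; the outer repeat-detection set is kept.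
import Mathlib
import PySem

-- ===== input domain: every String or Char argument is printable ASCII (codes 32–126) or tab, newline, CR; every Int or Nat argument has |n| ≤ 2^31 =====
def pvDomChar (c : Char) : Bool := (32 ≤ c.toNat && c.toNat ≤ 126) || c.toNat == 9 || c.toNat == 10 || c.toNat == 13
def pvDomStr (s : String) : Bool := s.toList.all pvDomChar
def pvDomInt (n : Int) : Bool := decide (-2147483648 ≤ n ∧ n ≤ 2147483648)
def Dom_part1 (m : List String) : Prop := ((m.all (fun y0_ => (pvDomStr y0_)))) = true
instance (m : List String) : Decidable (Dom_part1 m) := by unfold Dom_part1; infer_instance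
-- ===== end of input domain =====

-- B replaces A's per-cell neighbour enumeration and string-grid rebuilding by whole-row bitmasks
-- advanced with bit-parallel full-adder logic over shifted masks, and a Horner-form score;
-- the outer repeat-detection set is kept. Objective: alternative.
-- Both ports use an identical, provably sufficient fuel bound as a totality guard for the
-- 'while True' loop (the guard value -1 transliterates A's unreachable 'return -1').

-- ===== PORT A =====
-- m[ny][nx] : Char; the '?' defaults are unreachable on the inputs Pre_part1 admits (indices in range)
def charAtI (m : List String) (x y : Int) : Char :=
  ((PySem.List.pyGet? m y).bind (fun row => PySem.List.pyGet? row.toList x)).getD '?'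

-- len(m[0]) ; Python would raise on m = [], where A never evaluates it (loops are empty): default ""
def lenRow0 (m : List String) : Nat := (m.headD "").toList.length

def getNeighbors (m : List String) (x y : Int) : List (Int × Int) :=
  let possibilities := [(x + 1, y), (x - 1, y), (x, y + 1), (x, y - 1)]
  possibilities.foldl
    (fun neighbors p =>
      if 0 ≤ p.1 ∧ p.1 < (lenRow0 m : Int) ∧ 0 ≤ p.2 ∧ p.2 < (m.length : Int)
      then neighbors ++ [p] else neighbors) []

-- the shared counting loop of get_new_bug_state / get_new_empty_state
def countBugs (m : List String) (neighbors : List (Int × Int)) : Nat :=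
  neighbors.foldl (fun count p => if charAtI m p.1 p.2 = '#' then count + 1 else count) 0

def getNewBugState (m : List String) (neighbors : List (Int × Int)) : String :=
  if countBugs m neighbors = 1 then "#" else "."

def getNewEmptyState (m : List String) (neighbors : List (Int × Int)) : String :=
  if countBugs m neighbors = 1 ∨ countBugs m neighbors = 2 then "#" else "."

def getNewMap (m : List String) : List String :=
  (List.range m.length).foldl
    (fun (newMap : List String) (y : Nat) =>
      newMap ++ [(List.range (lenRow0 m)).foldl
        (fun (newRow : String) (x : Nat) =>
          let tile := charAtI m (x : Int) (y : Int)
          if tile = '#' then newRow ++ getNewBugState m (getNeighbors m x y)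
          else if tile = '.' then newRow ++ getNewEmptyState m (getNeighbors m x y)
          else newRow ++ "?")   -- Python raises here; unreachable under Pre_part1
        ""]) []

def calcScore (m : List String) : Int :=
  (List.range m.length).foldl
    (fun (points : Int) (y : Nat) =>
      (List.range (lenRow0 m)).foldl
        (fun (points : Int) (x : Nat) =>
          if charAtI m (x : Int) (y : Int) = '#' then points + (2 : Int) ^ (y * m.length + x)
          else points)
        points) 0

def loopA (fuel : Nat) (scores : PySem.Set Int) (m : List String) : Int :=
  match fuel with
  | 0 => -1        -- fuel guard only; transliterates A's unreachable 'return -1'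
  | fuel + 1 =>
    let newMap := getNewMap m
    let score := calcScore newMap
    if PySem.Set.contains scores score then score
    else loopA fuel (PySem.Set.add scores score) newMap

-- fuel 2^(h*h+w)+1 bounds the loop: every score is a sum of distinct-or-repeated powers
-- 2^(y*h+x) < 2^(h*h+w), and each non-returning iteration adds a NEW score to the set
def part1 (m : List String) : Int :=
  loopA (2 ^ (m.length * m.length + lenRow0 m) + 1) PySem.Set.empty m

-- ===== PORT B =====
-- row parse: bit x of the mask is set iff line[x] == '#'; the Python 'elif tile != '.': raise'
-- branch is unreachable under Pre_part1 (the else arm leaves r unchanged)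
def encRowB (w : Nat) (line : String) : Nat :=
  (List.range w).foldl
    (fun r x =>
      if line.toList[x]?.getD '?' = '#' then r ||| (1 <<< x) else r) 0

-- one row of Source B's step loop body: bit-parallel exactly-one / exactly-two neighbour masks
def stepRowB (full r c d : Nat) : Nat :=
  let a := (r <<< 1) &&& full
  let b := r >>> 1
  let par := ((a ^^^ b) ^^^ c) ^^^ d
  let e1 := (par &&& (full ^^^ (a &&& b))) &&& (full ^^^ (c &&& d))
  let e2 := ((full ^^^ par) &&& (((a ||| b) ||| c) ||| d)) &&& (full ^^^ (((a &&& b) &&& c) &&& d))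
  (r &&& e1) ||| ((full ^^^ r) &&& (e1 ||| e2))

-- above = [0] + rows[:-1]; below = rows[1:] + [0]; iterate over zip(rows, above, below)
def stepB (full : Nat) (rows : List Nat) : List Nat :=
  let above := 0 :: rows.dropLast
  let below := rows.tail ++ [0]
  ((rows.zip above).zip below).foldl
    (fun out p => out ++ [stepRowB full p.1.1 p.1.2 p.2]) []

-- Horner form of sum(rows[y] << (y*h)); Python's s is a nonnegative int, computed in Nat
def scoreB (h : Nat) (rows : List Nat) : Nat :=
  rows.reverse.foldl (fun s r => (s <<< h) + r) 0

def loopB (h full : Nat) (fuel : Nat) (seen : PySem.Set Int) (rows : List Nat) : Int :=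
  match fuel with
  | 0 => -1        -- fuel guard only (same fuel value as port A); unreachable
  | fuel + 1 =>
    let rows' := stepB full rows
    let s : Int := (scoreB h rows' : Int)
    if PySem.Set.contains seen s then s
    else loopB h full fuel (PySem.Set.add seen s) rows'

def part1_alt (m : List String) : Int :=
  let h := m.length
  let w := (m.headD "").toList.length      -- len(m[0]) if m else 0
  let full := (1 <<< w) - 1
  loopB h full (2 ^ (h * h + w) + 1) PySem.Set.empty (m.map (encRowB w))

-- ===== PRECONDITION & SPEC =====
-- Pre_part1 excludes exactly the inputs where A raises: a row shorter than the first row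
-- (IndexError on m[y][x]) or any tile among the first len(m[0]) characters of a row that is
-- neither '#' nor '.' (A's explicit 'raise Exception'). A returns on every other input.
def Pre_part1 (m : List String) : Prop :=
  ∀ r ∈ m, lenRow0 m ≤ r.toList.length ∧
    ∀ x < lenRow0 m, r.toList[x]? = some '#' ∨ r.toList[x]? = some '.'
instance (m : List String) : Decidable (Pre_part1 m) := by unfold Pre_part1; infer_instance

def pvWitness_part1 : List String := ["##.", "..#", ".#."]

def Spec_part1 (m : List String) (out : Int) : Prop := out = part1_alt m
instance (m : List String) (out : Int) : Decidable (Spec_part1 m out) := by unfold Spec_part1; infer_instance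

-- ===== CLAIM (what is proved, stated in full; the proofs are below) =====
def Claim_equal_part1 : Prop := ∀ (m : List String), Dom_part1 m → Pre_part1 m → Spec_part1 m (part1 m)

-- ===== LEMMAS AND PROOFS =====

-- m[y][x] as a total helper for the proofs
def charAtN (m : List String) (x y : Nat) : Char := ((m[y]?.getD "").toList[x]?.getD '?')

-- shape invariant carried through the loop: h rows, first row exactly w long (when h > 0), every
-- row at least w long with only '#'/'.' among its first w characters
def ValidP (h w : Nat) (m : List String) : Prop :=
  m.length = h ∧ (0 < h → lenRow0 m = w) ∧
  ∀ r ∈ m, w ≤ r.toList.length ∧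
    ∀ x < w, r.toList[x]? = some '#' ∨ r.toList[x]? = some '.'

-- neighbour count of cell (x,y), written left/right/up/down
def cntS (m : List String) (h w x y : Nat) : Nat :=
  (if 0 < x then (if charAtN m (x - 1) y = '#' then 1 else 0) else 0)
  + (if x + 1 < w then (if charAtN m (x + 1) y = '#' then 1 else 0) else 0)
  + (if 0 < y then (if charAtN m x (y - 1) = '#' then 1 else 0) else 0)
  + (if y + 1 < h then (if charAtN m x (y + 1) = '#' then 1 else 0) else 0)

def newCharS (m : List String) (h w x y : Nat) : Char :=
  if charAtN m x y = '#' then (if cntS m h w x y = 1 then '#' else '.')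
  else (if cntS m h w x y = 1 ∨ cntS m h w x y = 2 then '#' else '.')

lemma charAtI_natCast (m : List String) (x y : Nat) :
    charAtI m (x : Int) (y : Int) = charAtN m x y := by
  unfold charAtI charAtN
  rw [PySem.List.pyGet?_natCast]
  cases hm : m[y]? with
  | none => simp
  | some row => simp [PySem.List.pyGet?_natCast]

lemma getNeighbors_eq (m : List String) (h w x y : Nat) (hh : m.length = h)
    (hw : lenRow0 m = w) (hx : x < w) (hy : y < h) :
    getNeighbors m (x : Int) (y : Int) =
      (if x + 1 < w then [(((x + 1 : Nat) : Int), (y : Int))] else [])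
      ++ (if 0 < x then [(((x - 1 : Nat) : Int), (y : Int))] else [])
      ++ (if y + 1 < h then [((x : Int), ((y + 1 : Nat) : Int))] else [])
      ++ (if 0 < y then [((x : Int), ((y - 1 : Nat) : Int))] else []) := by
  simp only [getNeighbors, hh, hw, List.foldl_cons, List.foldl_nil]
  split_ifs <;> try (exfalso; omega)
  all_goals (simp; try omega)

lemma countBugs_eq (m : List String) (h w x y : Nat) (hv : ValidP h w m)
    (hx : x < w) (hy : y < h) :
    countBugs m (getNeighbors m (x : Int) (y : Int)) = cntS m h w x y := by
  obtain ⟨hh, hw0, _⟩ := hv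
  have hw : lenRow0 m = w := hw0 (by omega)
  rw [getNeighbors_eq m h w x y hh hw hx hy]
  unfold countBugs cntS
  by_cases c1 : 0 < x <;> by_cases c2 : x + 1 < w <;>
    by_cases c3 : 0 < y <;> by_cases c4 : y + 1 < h <;>
    simp only [c1, c2, c3, c4, if_true, if_false,
      List.nil_append, List.append_nil, List.cons_append,
      List.foldl_cons, List.foldl_nil, charAtI_natCast] <;>
    split_ifs <;> omega

lemma charAtN_of_valid (m : List String) (h w x y : Nat) (hv : ValidP h w m)
    (hx : x < w) (hy : y < h) :
    charAtN m x y = '#' ∨ charAtN m x y = '.' := by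
  obtain ⟨hh, _, hr⟩ := hv
  have hym : y < m.length := by omega
  have hmem : m[y] ∈ m := List.getElem_mem hym
  have hch := (hr m[y] hmem).2 x hx
  unfold charAtN
  rw [List.getElem?_eq_getElem hym]
  rcases hch with h' | h' <;> simp [h']

lemma row_foldl_eq (m : List String) (h w y : Nat) (hv : ValidP h w m) (hy : y < h) :
    ∀ k, k ≤ w →
      (List.range k).foldl
        (fun (newRow : String) (x : Nat) =>
          let tile := charAtI m (x : Int) (y : Int)
          if tile = '#' then newRow ++ getNewBugState m (getNeighbors m (x : Int) (y : Int))
          else if tile = '.' then newRow ++ getNewEmptyState m (getNeighbors m (x : Int) (y : Int))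
          else newRow ++ "?") ""
      = String.ofList ((List.range k).map (fun x => newCharS m h w x y)) := by
  intro k
  induction k with
  | zero => intro _; rfl
  | succ n ih =>
    intro hk
    rw [List.range_succ, List.foldl_append, List.map_append, ih (by omega)]
    simp only [List.foldl_cons, List.foldl_nil, List.map_cons, List.map_nil,
      charAtI_natCast]
    have hcnt := countBugs_eq m h w n y hv (by omega) hy
    rcases charAtN_of_valid m h w n y hv (by omega) hy with hc | hc <;>
      simp only [hc, getNewBugState, getNewEmptyState, newCharS, hcnt,
        reduceIte] <;>
      split_ifs <;>
      simp_all [String.ofList_append]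

lemma getNewMap_eq (m : List String) (h w : Nat) (hv : ValidP h w m) :
    getNewMap m = (List.range h).map
      (fun y => String.ofList ((List.range w).map (fun x => newCharS m h w x y))) := by
  rcases Nat.eq_zero_or_pos h with h0 | h0
  · subst h0
    have hm : m = [] := List.length_eq_zero_iff.mp hv.1
    subst hm
    rfl
  · have hh : m.length = h := hv.1
    have hw : lenRow0 m = w := hv.2.1 h0
    unfold getNewMap
    rw [hh, hw]
    have step : ∀ (l : List Nat) (acc : List String),
        l.foldl (fun (newMap : List String) (y : Nat) => newMap ++ [(List.range w).foldl
          (fun (newRow : String) (x : Nat) =>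
            let tile := charAtI m (x : Int) (y : Int)
            if tile = '#' then newRow ++ getNewBugState m (getNeighbors m (x : Int) (y : Int))
            else if tile = '.' then newRow ++ getNewEmptyState m (getNeighbors m (x : Int) (y : Int))
            else newRow ++ "?") ""]) acc
        = acc ++ l.map (fun (y : Nat) => (List.range w).foldl
          (fun (newRow : String) (x : Nat) =>
            let tile := charAtI m (x : Int) (y : Int)
            if tile = '#' then newRow ++ getNewBugState m (getNeighbors m (x : Int) (y : Int))
            else if tile = '.' then newRow ++ getNewEmptyState m (getNeighbors m (x : Int) (y : Int))
            else newRow ++ "?") "") := by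
      intro l
      induction l with
      | nil => intro acc; simp
      | cons a l ihl =>
        intro acc
        simp only [List.foldl_cons, List.map_cons]
        rw [ihl]
        simp
    rw [step]
    simp only [List.nil_append]
    apply List.map_congr_left
    intro y hyl
    exact row_foldl_eq m h w y hv (List.mem_range.mp hyl) w le_rfl

lemma validP_getNewMap (m : List String) (h w : Nat) (hv : ValidP h w m) :
    ValidP h w (getNewMap m) := by
  rw [getNewMap_eq m h w hv]
  refine ⟨by simp, ?_, ?_⟩
  · intro h0
    unfold lenRow0
    have hhd : ((List.range h).map
        (fun y => String.ofList ((List.range w).map (fun x => newCharS m h w x y)))).headD ""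
        = String.ofList ((List.range w).map (fun x => newCharS m h w x 0)) := by
      cases h with
      | zero => omega
      | succ k => simp [List.range_succ_eq_map]
    rw [hhd]
    simp
  · intro r hr
    simp only [List.mem_map, List.mem_range] at hr
    obtain ⟨y, hy, rfl⟩ := hr
    refine ⟨by simp, ?_⟩
    intro x hx
    simp only [String.toList_ofList, List.getElem?_map, List.getElem?_range hx,
      Option.map_some]
    unfold newCharS
    split_ifs <;> simp

-- ===== B-side lemmas =====

lemma or_two_pow (i : Nat) : ∀ a, a < 2 ^ i → a ||| 2 ^ i = a + 2 ^ i := by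
  induction i with
  | zero =>
    intro a ha
    have : a = 0 := by omega
    subst this; decide
  | succ i ih =>
    intro a ha
    have hdiv : a / 2 < 2 ^ i := by
      have : 2 ^ (i + 1) = 2 ^ i * 2 := by ring
      omega
    have hrec := ih (a / 2) hdiv
    have hbit : Nat.bit (a % 2 = 1) (a / 2) = a := by
      rcases Nat.mod_two_eq_zero_or_one a with h | h <;> simp [Nat.bit_val, h] <;> omega
    have hpow : Nat.bit false (2 ^ i) = 2 ^ (i + 1) := by
      simp [Nat.bit_val]; ring
    calc a ||| 2 ^ (i + 1) = Nat.bit (a % 2 = 1) (a / 2) ||| Nat.bit false (2 ^ i) := by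
          rw [hbit, hpow]
      _ = Nat.bit ((a % 2 = 1) || false) (a / 2 ||| 2 ^ i) := Nat.lor_bit _ _ _ _
      _ = a + 2 ^ (i + 1) := by
          rcases Nat.mod_two_eq_zero_or_one a with h | h <;>
            simp [Nat.bit_val, hrec, h] <;> ring_nf <;> omega

lemma testBit_foldl_set {α : Type} (l : List α) (p : α → Prop) [DecidablePred p]
    (idx : α → Nat) (g0 : Nat) (j : Nat) :
    (l.foldl (fun g a => if p a then g ||| (1 <<< idx a) else g) g0).testBit j
      = (g0.testBit j || l.any (fun a => decide (p a) && (idx a == j))) := by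
  induction l generalizing g0 with
  | nil => simp
  | cons a l ih =>
    simp only [List.foldl_cons, List.any_cons]
    rw [ih]
    by_cases hpa : p a
    · simp only [hpa, if_true, decide_true, Bool.true_and, Nat.testBit_or,
        Nat.one_shiftLeft, Nat.testBit_two_pow]
      cases hg : g0.testBit j <;> cases hd : (idx a == j) <;>
        simp_all
    · simp [hpa]

lemma testBit_encRowB (w : Nat) (line : String) (j : Nat) :
    (encRowB w line).testBit j
      = (decide (j < w) && decide (line.toList[j]?.getD '?' = '#')) := by
  rw [encRowB,
    testBit_foldl_set (List.range w) (fun x => line.toList[x]?.getD '?' = '#') (fun x => x) 0 j]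
  simp only [Nat.zero_testBit, Bool.false_or]
  by_cases hj : j < w
  · by_cases hp : line.toList[j]?.getD '?' = '#'
    · simp only [hj, hp, decide_true, Bool.true_and]
      rw [List.any_eq_true]
      exact ⟨j, List.mem_range.mpr hj, by simp [hp]⟩
    · simp only [hp, decide_false, Bool.and_false]
      rw [List.any_eq_false]
      intro a _
      simp only [Bool.and_eq_true, beq_iff_eq, decide_eq_true_eq, not_and]
      intro hpa he
      exact hp (he ▸ hpa)
  · simp only [hj, decide_false, Bool.false_and]
    rw [List.any_eq_false]
    intro a ha
    have := List.mem_range.mp ha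
    simp only [Bool.and_eq_true, beq_iff_eq, decide_eq_true_eq, not_and]
    intro _
    omega

lemma encRowB_lt (line : String) : ∀ k, encRowB k line < 2 ^ k := by
  intro k
  induction k with
  | zero => simp [encRowB]
  | succ n ih =>
    have hsucc : encRowB (n + 1) line
        = if line.toList[n]?.getD '?' = '#' then encRowB n line ||| (1 <<< n)
          else encRowB n line := by
      simp [encRowB, List.range_succ]
    rw [hsucc]
    have h2 : (2 : Nat) ^ (n + 1) = 2 ^ n * 2 := by ring
    split_ifs
    · rw [Nat.one_shiftLeft]
      exact Nat.or_lt_two_pow (by omega) (by omega)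
    · omega

lemma encRowB_succ_add (line : String) (k : Nat) :
    encRowB (k + 1) line
      = encRowB k line + (if line.toList[k]?.getD '?' = '#' then 2 ^ k else 0) := by
  have hsucc : encRowB (k + 1) line
      = if line.toList[k]?.getD '?' = '#' then encRowB k line ||| (1 <<< k)
        else encRowB k line := by
    simp [encRowB, List.range_succ]
  rw [hsucc]
  split_ifs
  · rw [Nat.one_shiftLeft, or_two_pow k _ (encRowB_lt line k)]
  · omega

-- the per-bit update rule: full-adder logic vs the count conditions (A/B/C/D are the four
-- neighbour-bug bits, each a guard && a character test; R the current-cell bit)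
lemma bitGlue (R A2 A3 A4 A5 G1 G2 G3 G4 : Bool) :
    ((R && (((((G1 && A2) ^^ (G2 && A3)) ^^ (G3 && A4)) ^^ (G4 && A5))
        && !((G1 && A2) && (G2 && A3)) && !((G3 && A4) && (G4 && A5))))
      || (!R && ((((((G1 && A2) ^^ (G2 && A3)) ^^ (G3 && A4)) ^^ (G4 && A5))
            && !((G1 && A2) && (G2 && A3)) && !((G3 && A4) && (G4 && A5)))
          || (!((((G1 && A2) ^^ (G2 && A3)) ^^ (G3 && A4)) ^^ (G4 && A5))
            && (((G1 && A2) || (G2 && A3)) || (G3 && A4) || (G4 && A5))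
            && !(((G1 && A2) && (G2 && A3) && (G3 && A4)) && (G4 && A5))))))
    = cond R
        (decide ((G1 && A2).toNat + (G2 && A3).toNat + (G3 && A4).toNat + (G4 && A5).toNat = 1))
        (decide ((G1 && A2).toNat + (G2 && A3).toNat + (G3 && A4).toNat + (G4 && A5).toNat = 1
          ∨ (G1 && A2).toNat + (G2 && A3).toNat + (G3 && A4).toNat + (G4 && A5).toNat = 2)) := by
  revert R A2 A3 A4 A5 G1 G2 G3 G4
  decide

lemma if_if_toNat (p q : Prop) [Decidable p] [Decidable q] :
    (if p then (if q then (1 : Nat) else 0) else 0) = (decide p && decide q).toNat := by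
  by_cases hp : p <;> by_cases hq : q <;> simp [hp, hq]

lemma cntS_toNat (m : List String) (h w x y : Nat) :
    cntS m h w x y
      = (decide (1 ≤ x) && decide (charAtN m (x - 1) y = '#')).toNat
        + (decide (x + 1 < w) && decide (charAtN m (x + 1) y = '#')).toNat
        + (decide (0 < y) && decide (charAtN m x (y - 1) = '#')).toNat
        + (decide (y + 1 < h) && decide (charAtN m x (y + 1) = '#')).toNat := by
  unfold cntS
  rw [if_if_toNat, if_if_toNat, if_if_toNat, if_if_toNat,
    show (decide (0 < x)) = (decide (1 ≤ x)) from decide_eq_decide.mpr (by omega)]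

lemma testBit_above (m : List String) (w y j : Nat) :
    (if y = 0 then 0 else encRowB w (m[y - 1]?.getD "")).testBit j
      = (decide (0 < y) && (decide (j < w) && decide (charAtN m j (y - 1) = '#'))) := by
  by_cases hy : y = 0
  · simp [hy]
  · have hy' : 0 < y := Nat.pos_of_ne_zero hy
    simp only [hy, if_false, testBit_encRowB, charAtN, hy', decide_true, Bool.true_and]
    rfl

lemma testBit_below (m : List String) (h w y j : Nat) :
    (if y + 1 < h then encRowB w (m[y + 1]?.getD "") else 0).testBit j
      = (decide (y + 1 < h) && (decide (j < w) && decide (charAtN m j (y + 1) = '#'))) := by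
  by_cases hy : y + 1 < h
  · simp only [hy, if_true, testBit_encRowB, charAtN, decide_true, Bool.true_and]
    rfl
  · simp [hy]

lemma stepRowB_correct (m : List String) (h w y : Nat) :
    stepRowB (2 ^ w - 1) (encRowB w (m[y]?.getD ""))
        (if y = 0 then 0 else encRowB w (m[y - 1]?.getD ""))
        (if y + 1 < h then encRowB w (m[y + 1]?.getD "") else 0)
      = encRowB w (String.ofList ((List.range w).map (fun x => newCharS m h w x y))) := by
  apply Nat.eq_of_testBit_eq
  intro j
  rw [testBit_encRowB]
  by_cases hj : j < w
  · have hrhs : (String.ofList ((List.range w).map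
        (fun x => newCharS m h w x y))).toList[j]?.getD '?' = newCharS m h w j y := by
      simp [List.getElem?_map, List.getElem?_range hj]
    rw [hrhs]
    have d0 : decide (j < w) = true := by simp [hj]
    have d1 : decide (j - 1 < w) = true := by simp; omega
    have hcond : decide (newCharS m h w j y = '#')
        = cond (decide (charAtN m j y = '#'))
            (decide (cntS m h w j y = 1))
            (decide (cntS m h w j y = 1 ∨ cntS m h w j y = 2)) := by
      unfold newCharS
      by_cases hc : charAtN m j y = '#' <;> split_ifs <;> simp_all
    rw [hcond, cntS_toNat]
    simp only [stepRowB, Nat.testBit_or, Nat.testBit_and, Nat.testBit_xor,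
      Nat.testBit_shiftLeft, Nat.testBit_shiftRight, Nat.testBit_two_pow_sub_one,
      testBit_encRowB, testBit_above, testBit_below,
      Nat.add_comm 1 j, d0, d1, Bool.true_and, Bool.and_true, Bool.true_xor]
    exact bitGlue _ _ _ _ _ _ _ _ _
  · have d2' : decide (1 + j < w) = false := by simp; omega
    simp [stepRowB, Nat.testBit_or, Nat.testBit_and, Nat.testBit_xor,
      Nat.testBit_shiftLeft, Nat.testBit_shiftRight, Nat.testBit_two_pow_sub_one,
      testBit_encRowB, testBit_above, testBit_below, d2', hj]

lemma stepB_correct (m : List String) (h w : Nat) (hv : ValidP h w m) :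
    stepB (2 ^ w - 1) (m.map (encRowB w)) = (getNewMap m).map (encRowB w) := by
  have hh : m.length = h := hv.1
  rw [getNewMap_eq m h w hv, List.map_map]
  simp only [stepB]
  rw [PySem.List.foldl_append_singleton_eq_map]
  apply List.ext_getElem
  · simp [hh]
    omega
  · intro i hi1 hi2
    have hi : i < h := by
      simpa [hh] using hi2
    have him : i < m.length := by omega
    simp only [List.nil_append, List.getElem_map, List.getElem_zip, List.getElem_range,
      Function.comp]
    have hrow : m[i] = m[i]?.getD "" := by
      simp [List.getElem?_eq_getElem him]
    have habove : (0 :: (m.map (encRowB w)).dropLast)[i]'(by simp [hh]; omega)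
        = (if i = 0 then 0 else encRowB w (m[i - 1]?.getD "")) := by
      rcases Nat.eq_zero_or_pos i with rfl | hipos
      · simp
      · obtain ⟨k, rfl⟩ : ∃ k, i = k + 1 := ⟨i - 1, by omega⟩
        have hk : k < m.length := by omega
        simp [List.getElem_dropLast, List.getElem?_eq_getElem hk]
    have hbelow : ((m.map (encRowB w)).tail ++ [0])[i]'(by simp [hh]; omega)
        = (if i + 1 < h then encRowB w (m[i + 1]?.getD "") else 0) := by
      by_cases hib : i + 1 < h
      · rw [List.getElem_append_left (by simp [hh]; omega)]
        have hk : i + 1 < m.length := by omega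
        simp [List.getElem_tail, List.getElem?_eq_getElem hk, hib]
      · rw [List.getElem_append_right (by simp [hh]; omega)]
        simp [hib]
    rw [hrow, habove, hbelow, stepRowB_correct m h w i]


lemma inner_fold_eq (m : List String) (y L : Nat) (p : Int) :
    ∀ k, (List.range k).foldl
        (fun (points : Int) (x : Nat) =>
          if charAtI m (x : Int) (y : Int) = '#' then points + (2 : Int) ^ (y * L + x)
          else points) p
      = p + (encRowB k (m[y]?.getD "") : Int) * (2 : Int) ^ (y * L) := by
  intro k
  induction k with
  | zero => simp [encRowB]
  | succ n ih =>
    rw [List.range_succ, List.foldl_append, ih]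
    simp only [List.foldl_cons, List.foldl_nil, charAtI_natCast]
    rw [encRowB_succ_add]
    have hch : charAtN m n y = (m[y]?.getD "").toList[n]?.getD '?' := rfl
    by_cases hc : (m[y]?.getD "").toList[n]?.getD '?' = '#'
    · simp only [hch, hc, if_true]
      push_cast
      rw [pow_add]
      ring
    · simp [hch, hc]

lemma calcScore_eq (m : List String) (h w : Nat) (hv : ValidP h w m) :
    calcScore m
      = ((((List.range h).map (fun y => encRowB w (m[y]?.getD "") * 2 ^ (y * h))).sum : Nat) : Int) := by
  rcases Nat.eq_zero_or_pos h with h0 | h0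
  · subst h0
    have hm : m = [] := List.length_eq_zero_iff.mp hv.1
    subst hm
    rfl
  · unfold calcScore
    rw [hv.1, hv.2.1 h0]
    have hout : (List.range h).foldl
        (fun (points : Int) (y : Nat) =>
          (List.range w).foldl
            (fun (points : Int) (x : Nat) =>
              if charAtI m (x : Int) (y : Int) = '#' then points + (2 : Int) ^ (y * h + x)
              else points) points) 0
        = (List.range h).foldl
            (fun (points : Int) (y : Nat) =>
              points + (encRowB w (m[y]?.getD "") : Int) * (2 : Int) ^ (y * h)) 0 := by
      apply List.foldl_ext
      intro b y _
      exact inner_fold_eq m y h b w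
    rw [hout, PySem.List.foldl_add]
    rw [Nat.cast_list_sum, List.map_map]
    rw [zero_add]
    congr 1

lemma scoreB_cons (h r : Nat) (l : List Nat) :
    scoreB h (r :: l) = scoreB h l * 2 ^ h + r := by
  simp [scoreB, List.reverse_cons, List.foldl_append, Nat.shiftLeft_eq]

lemma scoreB_map_range (h : Nat) : ∀ (n : Nat) (e : Nat → Nat),
    scoreB h ((List.range n).map e) = ((List.range n).map (fun y => e y * 2 ^ (y * h))).sum := by
  intro n
  induction n with
  | zero => intro e; simp [scoreB]
  | succ k ih =>
    intro e
    rw [List.range_succ_eq_map, List.map_cons, scoreB_cons, List.map_map, ih (e ∘ Nat.succ),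
      List.map_cons, List.sum_cons, List.map_map]
    rw [← List.sum_map_mul_right]
    have hpt : ((List.range k).map (fun y => (fun y => e y * 2 ^ (y * h)) (Nat.succ y)))
        = (List.range k).map (fun y => (e ∘ Nat.succ) y * 2 ^ (y * h) * 2 ^ h) := by
      apply List.map_congr_left
      intro y _
      have : (y + 1) * h = y * h + h := by ring
      simp [Function.comp, Nat.succ_eq_add_one, this, pow_add]
      ring
    rw [show ((List.range k).map ((fun y => e y * 2 ^ (y * h)) ∘ Nat.succ))
        = (List.range k).map (fun y => (fun y => e y * 2 ^ (y * h)) (Nat.succ y)) from rfl, hpt]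
    simp [Nat.add_comm]

lemma map_eq_range_map {α β : Type} (l : List α) (f : α → β) (d : α) :
    l.map f = (List.range l.length).map (fun i => f (l[i]?.getD d)) := by
  apply List.ext_getElem
  · simp
  · intro i h1 h2
    have hil : i < l.length := by simpa using h1
    simp [List.getElem?_eq_getElem hil]

lemma score_correct (m : List String) (h w : Nat) (hv : ValidP h w m) :
    calcScore m = ((scoreB h (m.map (encRowB w)) : Nat) : Int) := by
  rw [map_eq_range_map m (encRowB w) "", hv.1, scoreB_map_range]
  exact calcScore_eq m h w hv

lemma loop_eq (h w : Nat) (fuel : Nat) (scores : PySem.Set Int) (m : List String)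
    (hv : ValidP h w m) :
    loopA fuel scores m = loopB h (2 ^ w - 1) fuel scores (m.map (encRowB w)) := by
  induction fuel generalizing scores m with
  | zero => rfl
  | succ n ih =>
    simp only [loopA, loopB]
    rw [stepB_correct m h w hv,
      ← score_correct (getNewMap m) h w (validP_getNewMap m h w hv)]
    split
    · rfl
    · exact ih _ _ (validP_getNewMap m h w hv)

-- ===== VERDICT (by name: the statement is the Claim_ definition above) =====
theorem part1_spec : Claim_equal_part1 := by
  intro m _ hpre
  unfold Spec_part1 part1 part1_alt
  simp only [Nat.one_shiftLeft]
  exact loop_eq m.length (lenRow0 m) _ _ m ⟨rfl, fun _ => rfl, hpre⟩
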